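-- pv_equiv track=rewrite | github.com/mintorca/joc-serector | codig_test/map.py | solution
-- ===== SOURCE A (Python) =====
-- def solution(n, arr1, arr2):
--     map_1=[]
--     map_2=[]
--
--     answer = []
--     for a1,a2 in zip(arr1,arr2):
--         arr_all=format((a1 | a2),'b')
--         arr_all='0'*(n-len(arr_all))+arr_all
--         arr_all=arr_all.replace('1','#')
--         arr_all=arr_all.replace('0',' ')
--         answer.append(arr_all)
--     return answer
-- ===== SOURCE B (Python) =====
-- def to_row(v):
--     """Render an integer as a base-2 string over the digit alphabet ' '/'#'."""
--     if v < 0: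
--         return '-' + to_row(-v)
--     if v < 2:
--         return '#' if v == 1 else ' '
--     return to_row(v >> 1) + ('#' if v & 1 else ' ')
--
--
-- def solution(n, arr1, arr2):
--     return [to_row(a1 | a2).rjust(n) for a1, a2 in zip(arr1, arr2)]
-- ===== Notes on version B (the rewrite author's own statement) =====
-- stated objective: alternative
-- what changed: Each row is produced by a recursive base-2 renderer that emits ' '/'#' digits (and a leading '-' for negative values) directly, padded with rjust, instead of A's format-to-binary-string, manual zero-padding and two str.replace passes.
import Mathlib
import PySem

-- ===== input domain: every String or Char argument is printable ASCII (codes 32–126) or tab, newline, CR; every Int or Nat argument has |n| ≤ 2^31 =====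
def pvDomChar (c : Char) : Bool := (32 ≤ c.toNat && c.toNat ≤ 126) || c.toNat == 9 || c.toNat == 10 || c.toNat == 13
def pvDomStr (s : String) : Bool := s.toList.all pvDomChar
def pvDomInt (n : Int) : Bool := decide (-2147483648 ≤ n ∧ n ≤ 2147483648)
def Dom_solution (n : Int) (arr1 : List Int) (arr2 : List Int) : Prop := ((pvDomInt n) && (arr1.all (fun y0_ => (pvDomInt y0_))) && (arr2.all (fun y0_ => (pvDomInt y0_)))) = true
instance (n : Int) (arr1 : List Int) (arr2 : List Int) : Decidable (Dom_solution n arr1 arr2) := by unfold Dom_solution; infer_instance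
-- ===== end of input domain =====

-- B renders each row with a recursive base-2 renderer whose digit characters are ' ' and '#'
-- (standard sign handling: '-' then the magnitude), padded with rjust, instead of A's
-- format→zero-pad→replace/replace pipeline; same cost, a different algorithm.

-- ===== PORT A =====
-- loop body of A: format(a1|a2,'b'), zero-pad to n, replace '1'→'#', then '0'→' '
def rowA (n a1 a2 : Int) : String :=
  let arrAll := PySem.Int.toBin (PySem.Int.bor a1 a2)
  let arrAll := String.ofList (PySem.List.pyRepeat ['0'] (n - PySem.Str.len arrAll)) ++ arrAll
  let arrAll := PySem.Str.replace arrAll "1" "#"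
  let arrAll := PySem.Str.replace arrAll "0" " "
  arrAll

def solution (n : Int) (arr1 : List Int) (arr2 : List Int) : List String :=
  (arr1.zip arr2).foldl (fun answer p => answer ++ [rowA n p.1 p.2]) []

-- ===== PORT B =====
-- Source B's to_row; for v ≥ 2, Python's v >> 1 and v & 1 are v / 2 and v % 2 (exact there:
-- dividend nonnegative, so Lean's Euclidean Int division agrees with Python's shift)
def toRow (v : Int) : String :=
  if h0 : v < 0 then "-" ++ toRow (-v)
  else if h1 : v < 2 then (if v = 1 then "#" else " ")
  else toRow (v / 2) ++ (if v % 2 = 1 then "#" else " ")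
termination_by 2 * v.natAbs + (if v < 0 then 1 else 0)
decreasing_by
  · simp only [Int.natAbs_neg, if_pos h0, if_neg (show ¬ -v < 0 by omega)]
    omega
  · simp only [if_neg h0, if_neg (show ¬ v / 2 < 0 by omega)]
    omega

-- str.rjust(n) with the default space fill (exact: no-op when n ≤ len)
def rjust (s : String) (w : Int) : String :=
  String.ofList (PySem.List.pyRepeat [' '] (w - PySem.Str.len s) ++ s.toList)

def solution_alt (n : Int) (arr1 : List Int) (arr2 : List Int) : List String :=
  (arr1.zip arr2).map (fun p => rjust (toRow (PySem.Int.bor p.1 p.2)) n)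

-- ===== PRECONDITION & SPEC =====
def Spec_solution (n : Int) (arr1 : List Int) (arr2 : List Int) (out : List String) : Prop := out = solution_alt n arr1 arr2
instance (n : Int) (arr1 : List Int) (arr2 : List Int) (out : List String) : Decidable (Spec_solution n arr1 arr2 out) := by unfold Spec_solution; infer_instance

-- ===== CLAIM (what is proved, stated in full; the proofs are below) =====
def Claim_equal_solution : Prop := ∀ (n : Int) (arr1 : List Int) (arr2 : List Int), Dom_solution n arr1 arr2 → Spec_solution n arr1 arr2 (solution n arr1 arr2)

-- ===== LEMMAS AND PROOFS =====

-- the combined effect of A's two replaces on one character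
def repl (c : Char) : Char := if c = '1' then '#' else if c = '0' then ' ' else c

-- binary digits, most significant first (what format(n,'b') spells for n ≥ 0)
def bitsA (n : Nat) : List Char :=
  if h : n < 2 then [Nat.digitChar n]
  else bitsA (n / 2) ++ [Nat.digitChar (n % 2)]
termination_by n
decreasing_by exact Nat.div_lt_self (by omega) one_lt_two

theorem replace_go_single (c d : Char) :
    ∀ (fuel : Nat) (l acc : List Char), l.length ≤ fuel →
      PySem.Chars.replace.go [c] [d] fuel l acc
        = acc.reverse ++ l.map (fun x => if x = c then d else x) := by
  intro fuel
  induction fuel with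
  | zero =>
    intro l acc h
    have : l = [] := List.eq_nil_of_length_eq_zero (Nat.le_zero.mp h)
    subst this
    simp [PySem.Chars.replace.go]
  | succ fuel ih =>
    intro l acc h
    cases l with
    | nil => simp [PySem.Chars.replace.go]
    | cons x t =>
      rw [PySem.Chars.replace.go]
      by_cases hx : c = x
      · subst hx
        rw [if_pos (by simp [List.isPrefixOf])]
        rw [ih _ _ (by simpa using Nat.le_of_succ_le_succ h)]
        simp
      · rw [if_neg (by simp [List.isPrefixOf]; exact fun hh => absurd hh hx)]
        rw [ih _ _ (by simpa using Nat.le_of_succ_le_succ h)]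
        have hxc : ¬ x = c := fun hh => hx hh.symm
        simp [if_neg hxc]

theorem replace_single (c d : Char) (l : List Char) :
    PySem.Chars.replace l [c] [d] = l.map (fun x => if x = c then d else x) := by
  rw [PySem.Chars.replace, if_neg (by simp)]
  rw [replace_go_single c d l.length l [] le_rfl]
  simp

theorem toDigitsCore_eq_bitsA :
    ∀ (fuel n : Nat) (ds : List Char), n < 2 ^ fuel →
      Nat.toDigitsCore 2 (fuel + 1) n ds = bitsA n ++ ds := by
  intro fuel
  induction fuel with
  | zero =>
    intro n ds h
    have hn : n = 0 := by omega
    subst hn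
    simp [Nat.toDigitsCore, bitsA]
  | succ fuel ih =>
    intro n ds h
    rw [Nat.toDigitsCore]
    by_cases h2 : n / 2 = 0
    · have hn : n < 2 := by omega
      rw [if_pos h2]
      conv_rhs => rw [bitsA, dif_pos hn]
      rw [Nat.mod_eq_of_lt hn]
      rfl
    · rw [if_neg h2]
      have hb : n / 2 < 2 ^ fuel := by
        rw [pow_succ] at h
        omega
      rw [ih (n / 2) _ hb]
      conv_rhs => rw [bitsA, dif_neg (show ¬ n < 2 by omega)]
      simp

theorem toDigits_eq_bitsA (n : Nat) : Nat.toDigits 2 n = bitsA n := by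
  have := toDigitsCore_eq_bitsA n n [] Nat.lt_two_pow_self
  simpa [Nat.toDigits] using this

-- B's renderer on a nonnegative value is A's digit string after the two replaces
theorem toRow_nonneg (m : Nat) : (toRow (m : Int)).toList = (bitsA m).map repl := by
  induction m using Nat.strong_induction_on with
  | _ m ih =>
    by_cases h2 : m < 2
    · rw [toRow.eq_def, dif_neg (by omega), dif_pos (by omega), bitsA, dif_pos h2]
      interval_cases m <;> simp [Nat.digitChar, repl]
    · rw [toRow.eq_def, dif_neg (by omega), dif_neg (by omega), bitsA, dif_neg h2]
      have hdiv : (m : Int) / 2 = ((m / 2 : Nat) : Int) := by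
        omega
      rw [String.toList_append, hdiv, ih (m / 2) (Nat.div_lt_self (by omega) one_lt_two),
        List.map_append]
      congr 1
      have hmod : (m : Int) % 2 = ((m % 2 : Nat) : Int) := by
        omega
      rcases Nat.mod_two_eq_zero_or_one m with h | h <;>
        simp [hmod, h, Nat.digitChar, repl]

-- … and on any value it is format(v,'b') after the two replaces
theorem toRow_toList (v : Int) :
    (toRow v).toList = (PySem.Int.toBinChars v).map repl := by
  rw [PySem.Int.toBinChars]
  rcases lt_trichotomy v 0 with h | h | h
  · rw [if_pos h, toRow.eq_def, dif_pos h, String.toList_append,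
      show (-v) = ((v.natAbs : Nat) : Int) by omega, toRow_nonneg, toDigits_eq_bitsA]
    simp [repl]
  · subst h
    rw [if_neg (by omega), toDigits_eq_bitsA]
    rw [show ((0 : Int).toNat) = 0 from rfl]
    exact toRow_nonneg 0
  · rw [if_neg (by omega), toDigits_eq_bitsA,
      show v = ((v.toNat : Nat) : Int) by omega]
    rw [show (((v.toNat : Nat) : Int)).toNat = v.toNat by omega]
    exact toRow_nonneg v.toNat

theorem comp_eq_repl :
    ((fun x => if x = '0' then ' ' else x) ∘ (fun x => if x = '1' then '#' else x)) = repl := by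
  funext c
  simp only [Function.comp, repl]
  split_ifs <;> simp_all

theorem rowA_toList (n a1 a2 : Int) :
    (rowA n a1 a2).toList
      = List.replicate (n - ((PySem.Int.toBinChars (PySem.Int.bor a1 a2)).length : Int)).toNat ' '
          ++ (PySem.Int.toBinChars (PySem.Int.bor a1 a2)).map repl := by
  unfold rowA
  simp only [PySem.Str.toList_replace, String.toList_append, PySem.List.pyRepeat_singleton]
  rw [show ("1" : String).toList = ['1'] from rfl, show ("#" : String).toList = ['#'] from rfl,
    show ("0" : String).toList = ['0'] from rfl, show (" " : String).toList = [' '] from rfl]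
  rw [replace_single, replace_single, List.map_map, comp_eq_repl]
  simp [PySem.Str.len, PySem.Int.toBin, List.map_replicate, repl]

theorem rowB_toList (n v : Int) :
    (rjust (toRow v) n).toList
      = List.replicate (n - ((PySem.Int.toBinChars v).length : Int)).toNat ' '
          ++ (PySem.Int.toBinChars v).map repl := by
  simp only [rjust, PySem.List.pyRepeat_singleton, PySem.Str.len]
  rw [toRow_toList]
  simp

theorem row_eq (n a1 a2 : Int) : rowA n a1 a2 = rjust (toRow (PySem.Int.bor a1 a2)) n := by
  have h : (rowA n a1 a2).toList = (rjust (toRow (PySem.Int.bor a1 a2)) n).toList := by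
    rw [rowA_toList, rowB_toList]
  calc rowA n a1 a2 = String.ofList (rowA n a1 a2).toList := by simp
    _ = String.ofList (rjust (toRow (PySem.Int.bor a1 a2)) n).toList := by rw [h]
    _ = rjust (toRow (PySem.Int.bor a1 a2)) n := by simp

theorem foldl_append_map {α β : Type} (f : α → β) :
    ∀ (l : List α) (acc : List β),
      l.foldl (fun a p => a ++ [f p]) acc = acc ++ l.map f := by
  intro l
  induction l with
  | nil => simp
  | cons x t ih => intro acc; simp [List.foldl, ih]

-- ===== VERDICT (by name: the statement is the Claim_ definition above) =====
theorem solution_spec : Claim_equal_solution := by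
  intro n arr1 arr2 _
  unfold Spec_solution solution solution_alt
  rw [foldl_append_map]
  simp only [List.nil_append]
  apply List.map_congr_left
  intro p _
  exact row_eq n p.1 p.2
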